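-- pv_equiv track=rewrite | github.com/Riccardoalfieri2003/Q-Spire | qsmell-tool/test/ROC/ROCTestAlt3.py | _operations_match
-- ===== SOURCE A (Python) =====
-- def _operations_match(circuit_op_name: str, source_method_name: str) -> bool:
--     """Check if circuit operation name matches source method name."""
--     # Handle common aliases
--     aliases = {
--         'h': ['h', 'hadamard'],
--         'cx': ['cx', 'cnot'],
--         'measure': ['measure', 'm'],
--         'x': ['x', 'pauli_x'],
--         'y': ['y', 'pauli_y'],
--         'z': ['z', 'pauli_z'],
--         'barrier': ['barrier']
--     }
--
--     circuit_op_lower = circuit_op_name.lower()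
--     source_method_lower = source_method_name.lower()
--
--     # Direct match
--     if circuit_op_lower == source_method_lower:
--         return True
--
--     # Check aliases
--     for op, alias_list in aliases.items():
--         if circuit_op_lower == op and source_method_lower in alias_list:
--             return True
--         if source_method_lower == op and circuit_op_lower in alias_list:
--             return True
--
--     return False
-- ===== SOURCE B (Python) =====
-- _CANON = {
--     'h': 'h', 'hadamard': 'h',
--     'cx': 'cx', 'cnot': 'cx',
--     'measure': 'measure', 'm': 'measure',
--     'x': 'x', 'pauli_x': 'x',
--     'y': 'y', 'pauli_y': 'y',
--     'z': 'z', 'pauli_z': 'z',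
--     'barrier': 'barrier',
-- }
--
--
-- def _operations_match(circuit_op_name: str, source_method_name: str) -> bool:
--     """Check if circuit operation name matches source method name."""
--     a = circuit_op_name.lower()
--     b = source_method_name.lower()
--     if a == b:
--         return True
--     ca = _CANON.get(a)
--     cb = _CANON.get(b)
--     return ca is not None and ca == cb
-- ===== Notes on version B (the rewrite author's own statement) =====
-- stated objective: idiomatic
-- what changed: Replaced the scan over the alias table (with two membership branches per entry) by a single flat alias-to-canonical dict built once, returning true iff the lowercased names are equal or both look up to the same canonical id.
import Mathlib
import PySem

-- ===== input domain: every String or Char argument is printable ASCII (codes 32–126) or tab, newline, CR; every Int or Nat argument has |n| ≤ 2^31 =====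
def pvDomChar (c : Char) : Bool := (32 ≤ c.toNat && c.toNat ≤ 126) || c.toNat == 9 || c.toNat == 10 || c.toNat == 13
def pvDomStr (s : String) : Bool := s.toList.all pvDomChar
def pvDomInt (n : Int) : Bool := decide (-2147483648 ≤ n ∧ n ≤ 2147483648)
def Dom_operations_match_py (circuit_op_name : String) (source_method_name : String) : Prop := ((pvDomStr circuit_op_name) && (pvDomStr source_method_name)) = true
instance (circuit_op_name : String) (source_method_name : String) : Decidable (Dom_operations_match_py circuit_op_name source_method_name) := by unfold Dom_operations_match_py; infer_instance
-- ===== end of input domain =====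

-- B replaces A's scan over the alias table by one flat alias→canonical dict built once,
-- comparing the two canonical ids after two constant-time lookups (objective: idiomatic).

-- ===== PORT A =====
def pvAliasesA : List (String × List String) :=
  [("h", ["h", "hadamard"]), ("cx", ["cx", "cnot"]), ("measure", ["measure", "m"]),
   ("x", ["x", "pauli_x"]), ("y", ["y", "pauli_y"]), ("z", ["z", "pauli_z"]),
   ("barrier", ["barrier"])]

def pvAliasLoop (cl sl : String) : List (String × List String) → Bool
  | [] => false
  | (op, al) :: rest =>
    if cl == op && al.contains sl then true
    else if sl == op && al.contains cl then true
    else pvAliasLoop cl sl rest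

def operations_match_py (circuit_op_name : String) (source_method_name : String) : Bool :=
  let cl := PySem.Str.lower circuit_op_name
  let sl := PySem.Str.lower source_method_name
  if cl == sl then true
  else pvAliasLoop cl sl pvAliasesA

-- ===== PORT B =====
def pvCanon : PySem.Dict String String :=
  PySem.Dict.mk
    [("h", "h"), ("hadamard", "h"), ("cx", "cx"), ("cnot", "cx"),
     ("measure", "measure"), ("m", "measure"), ("x", "x"), ("pauli_x", "x"),
     ("y", "y"), ("pauli_y", "y"), ("z", "z"), ("pauli_z", "z"),
     ("barrier", "barrier")]

def operations_match_py_alt (circuit_op_name : String) (source_method_name : String) : Bool :=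
  let a := PySem.Str.lower circuit_op_name
  let b := PySem.Str.lower source_method_name
  if a == b then true
  else
    match PySem.Dict.get? pvCanon a, PySem.Dict.get? pvCanon b with
    | some ca, some cb => ca == cb
    | _, _ => false

-- ===== PRECONDITION & SPEC =====
def Spec_operations_match_py (circuit_op_name : String) (source_method_name : String) (out : Bool) : Prop := out = operations_match_py_alt circuit_op_name source_method_name
instance (circuit_op_name : String) (source_method_name : String) (out : Bool) : Decidable (Spec_operations_match_py circuit_op_name source_method_name out) := by unfold Spec_operations_match_py; infer_instance

-- ===== CLAIM (what is proved, stated in full; the proofs are below) =====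
def Claim_equal_operations_match_py : Prop := ∀ (circuit_op_name : String) (source_method_name : String), Dom_operations_match_py circuit_op_name source_method_name → Spec_operations_match_py circuit_op_name source_method_name (operations_match_py circuit_op_name source_method_name)

-- ===== LEMMAS AND PROOFS =====
lemma pv_case_1 (sl : String) (hne : "h" ≠ sl) :
    pvAliasLoop "h" sl pvAliasesA =
      (match PySem.Dict.get? pvCanon "h", PySem.Dict.get? pvCanon sl with
       | some ca, some cb => ca == cb
       | _, _ => false) := by
  by_cases s1 : sl = "h"
  · subst s1; exact absurd rfl hne
  by_cases s2 : sl = "hadamard"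
  · subst s2; decide
  by_cases s3 : sl = "cx"
  · subst s3; decide
  by_cases s4 : sl = "cnot"
  · subst s4; decide
  by_cases s5 : sl = "measure"
  · subst s5; decide
  by_cases s6 : sl = "m"
  · subst s6; decide
  by_cases s7 : sl = "x"
  · subst s7; decide
  by_cases s8 : sl = "pauli_x"
  · subst s8; decide
  by_cases s9 : sl = "y"
  · subst s9; decide
  by_cases s10 : sl = "pauli_y"
  · subst s10; decide
  by_cases s11 : sl = "z"
  · subst s11; decide
  by_cases s12 : sl = "pauli_z"
  · subst s12; decide
  by_cases s13 : sl = "barrier"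
  · subst s13; decide
  simp [pvAliasLoop, pvAliasesA, pvCanon, PySem.Dict.get?, Ne.symm s1, Ne.symm s2, Ne.symm s3, Ne.symm s4, Ne.symm s5, Ne.symm s6, Ne.symm s7, Ne.symm s8, Ne.symm s9, Ne.symm s10, Ne.symm s11, Ne.symm s12, Ne.symm s13, s1, s2, s3, s4, s5, s6, s7, s8, s9, s10, s11, s12, s13]

lemma pv_case_2 (sl : String) (hne : "hadamard" ≠ sl) :
    pvAliasLoop "hadamard" sl pvAliasesA =
      (match PySem.Dict.get? pvCanon "hadamard", PySem.Dict.get? pvCanon sl with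
       | some ca, some cb => ca == cb
       | _, _ => false) := by
  by_cases s1 : sl = "h"
  · subst s1; decide
  by_cases s2 : sl = "hadamard"
  · subst s2; exact absurd rfl hne
  by_cases s3 : sl = "cx"
  · subst s3; decide
  by_cases s4 : sl = "cnot"
  · subst s4; decide
  by_cases s5 : sl = "measure"
  · subst s5; decide
  by_cases s6 : sl = "m"
  · subst s6; decide
  by_cases s7 : sl = "x"
  · subst s7; decide
  by_cases s8 : sl = "pauli_x"
  · subst s8; decide
  by_cases s9 : sl = "y"
  · subst s9; decide
  by_cases s10 : sl = "pauli_y"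
  · subst s10; decide
  by_cases s11 : sl = "z"
  · subst s11; decide
  by_cases s12 : sl = "pauli_z"
  · subst s12; decide
  by_cases s13 : sl = "barrier"
  · subst s13; decide
  simp [pvAliasLoop, pvAliasesA, pvCanon, PySem.Dict.get?, Ne.symm s1, Ne.symm s2, Ne.symm s3, Ne.symm s4, Ne.symm s5, Ne.symm s6, Ne.symm s7, Ne.symm s8, Ne.symm s9, Ne.symm s10, Ne.symm s11, Ne.symm s12, Ne.symm s13, s1, s2, s3, s4, s5, s6, s7, s8, s9, s10, s11, s12, s13]

lemma pv_case_3 (sl : String) (hne : "cx" ≠ sl) :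
    pvAliasLoop "cx" sl pvAliasesA =
      (match PySem.Dict.get? pvCanon "cx", PySem.Dict.get? pvCanon sl with
       | some ca, some cb => ca == cb
       | _, _ => false) := by
  by_cases s1 : sl = "h"
  · subst s1; decide
  by_cases s2 : sl = "hadamard"
  · subst s2; decide
  by_cases s3 : sl = "cx"
  · subst s3; exact absurd rfl hne
  by_cases s4 : sl = "cnot"
  · subst s4; decide
  by_cases s5 : sl = "measure"
  · subst s5; decide
  by_cases s6 : sl = "m"
  · subst s6; decide
  by_cases s7 : sl = "x"
  · subst s7; decide
  by_cases s8 : sl = "pauli_x"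
  · subst s8; decide
  by_cases s9 : sl = "y"
  · subst s9; decide
  by_cases s10 : sl = "pauli_y"
  · subst s10; decide
  by_cases s11 : sl = "z"
  · subst s11; decide
  by_cases s12 : sl = "pauli_z"
  · subst s12; decide
  by_cases s13 : sl = "barrier"
  · subst s13; decide
  simp [pvAliasLoop, pvAliasesA, pvCanon, PySem.Dict.get?, Ne.symm s1, Ne.symm s2, Ne.symm s3, Ne.symm s4, Ne.symm s5, Ne.symm s6, Ne.symm s7, Ne.symm s8, Ne.symm s9, Ne.symm s10, Ne.symm s11, Ne.symm s12, Ne.symm s13, s1, s2, s3, s4, s5, s6, s7, s8, s9, s10, s11, s12, s13]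

lemma pv_case_4 (sl : String) (hne : "cnot" ≠ sl) :
    pvAliasLoop "cnot" sl pvAliasesA =
      (match PySem.Dict.get? pvCanon "cnot", PySem.Dict.get? pvCanon sl with
       | some ca, some cb => ca == cb
       | _, _ => false) := by
  by_cases s1 : sl = "h"
  · subst s1; decide
  by_cases s2 : sl = "hadamard"
  · subst s2; decide
  by_cases s3 : sl = "cx"
  · subst s3; decide
  by_cases s4 : sl = "cnot"
  · subst s4; exact absurd rfl hne
  by_cases s5 : sl = "measure"
  · subst s5; decide
  by_cases s6 : sl = "m"
  · subst s6; decide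
  by_cases s7 : sl = "x"
  · subst s7; decide
  by_cases s8 : sl = "pauli_x"
  · subst s8; decide
  by_cases s9 : sl = "y"
  · subst s9; decide
  by_cases s10 : sl = "pauli_y"
  · subst s10; decide
  by_cases s11 : sl = "z"
  · subst s11; decide
  by_cases s12 : sl = "pauli_z"
  · subst s12; decide
  by_cases s13 : sl = "barrier"
  · subst s13; decide
  simp [pvAliasLoop, pvAliasesA, pvCanon, PySem.Dict.get?, Ne.symm s1, Ne.symm s2, Ne.symm s3, Ne.symm s4, Ne.symm s5, Ne.symm s6, Ne.symm s7, Ne.symm s8, Ne.symm s9, Ne.symm s10, Ne.symm s11, Ne.symm s12, Ne.symm s13, s1, s2, s3, s4, s5, s6, s7, s8, s9, s10, s11, s12, s13]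

lemma pv_case_5 (sl : String) (hne : "measure" ≠ sl) :
    pvAliasLoop "measure" sl pvAliasesA =
      (match PySem.Dict.get? pvCanon "measure", PySem.Dict.get? pvCanon sl with
       | some ca, some cb => ca == cb
       | _, _ => false) := by
  by_cases s1 : sl = "h"
  · subst s1; decide
  by_cases s2 : sl = "hadamard"
  · subst s2; decide
  by_cases s3 : sl = "cx"
  · subst s3; decide
  by_cases s4 : sl = "cnot"
  · subst s4; decide
  by_cases s5 : sl = "measure"
  · subst s5; exact absurd rfl hne
  by_cases s6 : sl = "m"
  · subst s6; decide
  by_cases s7 : sl = "x"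
  · subst s7; decide
  by_cases s8 : sl = "pauli_x"
  · subst s8; decide
  by_cases s9 : sl = "y"
  · subst s9; decide
  by_cases s10 : sl = "pauli_y"
  · subst s10; decide
  by_cases s11 : sl = "z"
  · subst s11; decide
  by_cases s12 : sl = "pauli_z"
  · subst s12; decide
  by_cases s13 : sl = "barrier"
  · subst s13; decide
  simp [pvAliasLoop, pvAliasesA, pvCanon, PySem.Dict.get?, Ne.symm s1, Ne.symm s2, Ne.symm s3, Ne.symm s4, Ne.symm s5, Ne.symm s6, Ne.symm s7, Ne.symm s8, Ne.symm s9, Ne.symm s10, Ne.symm s11, Ne.symm s12, Ne.symm s13, s1, s2, s3, s4, s5, s6, s7, s8, s9, s10, s11, s12, s13]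

lemma pv_case_6 (sl : String) (hne : "m" ≠ sl) :
    pvAliasLoop "m" sl pvAliasesA =
      (match PySem.Dict.get? pvCanon "m", PySem.Dict.get? pvCanon sl with
       | some ca, some cb => ca == cb
       | _, _ => false) := by
  by_cases s1 : sl = "h"
  · subst s1; decide
  by_cases s2 : sl = "hadamard"
  · subst s2; decide
  by_cases s3 : sl = "cx"
  · subst s3; decide
  by_cases s4 : sl = "cnot"
  · subst s4; decide
  by_cases s5 : sl = "measure"
  · subst s5; decide
  by_cases s6 : sl = "m"
  · subst s6; exact absurd rfl hne
  by_cases s7 : sl = "x"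
  · subst s7; decide
  by_cases s8 : sl = "pauli_x"
  · subst s8; decide
  by_cases s9 : sl = "y"
  · subst s9; decide
  by_cases s10 : sl = "pauli_y"
  · subst s10; decide
  by_cases s11 : sl = "z"
  · subst s11; decide
  by_cases s12 : sl = "pauli_z"
  · subst s12; decide
  by_cases s13 : sl = "barrier"
  · subst s13; decide
  simp [pvAliasLoop, pvAliasesA, pvCanon, PySem.Dict.get?, Ne.symm s1, Ne.symm s2, Ne.symm s3, Ne.symm s4, Ne.symm s5, Ne.symm s6, Ne.symm s7, Ne.symm s8, Ne.symm s9, Ne.symm s10, Ne.symm s11, Ne.symm s12, Ne.symm s13, s1, s2, s3, s4, s5, s6, s7, s8, s9, s10, s11, s12, s13]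

lemma pv_case_7 (sl : String) (hne : "x" ≠ sl) :
    pvAliasLoop "x" sl pvAliasesA =
      (match PySem.Dict.get? pvCanon "x", PySem.Dict.get? pvCanon sl with
       | some ca, some cb => ca == cb
       | _, _ => false) := by
  by_cases s1 : sl = "h"
  · subst s1; decide
  by_cases s2 : sl = "hadamard"
  · subst s2; decide
  by_cases s3 : sl = "cx"
  · subst s3; decide
  by_cases s4 : sl = "cnot"
  · subst s4; decide
  by_cases s5 : sl = "measure"
  · subst s5; decide
  by_cases s6 : sl = "m"
  · subst s6; decide
  by_cases s7 : sl = "x"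
  · subst s7; exact absurd rfl hne
  by_cases s8 : sl = "pauli_x"
  · subst s8; decide
  by_cases s9 : sl = "y"
  · subst s9; decide
  by_cases s10 : sl = "pauli_y"
  · subst s10; decide
  by_cases s11 : sl = "z"
  · subst s11; decide
  by_cases s12 : sl = "pauli_z"
  · subst s12; decide
  by_cases s13 : sl = "barrier"
  · subst s13; decide
  simp [pvAliasLoop, pvAliasesA, pvCanon, PySem.Dict.get?, Ne.symm s1, Ne.symm s2, Ne.symm s3, Ne.symm s4, Ne.symm s5, Ne.symm s6, Ne.symm s7, Ne.symm s8, Ne.symm s9, Ne.symm s10, Ne.symm s11, Ne.symm s12, Ne.symm s13, s1, s2, s3, s4, s5, s6, s7, s8, s9, s10, s11, s12, s13]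

lemma pv_case_8 (sl : String) (hne : "pauli_x" ≠ sl) :
    pvAliasLoop "pauli_x" sl pvAliasesA =
      (match PySem.Dict.get? pvCanon "pauli_x", PySem.Dict.get? pvCanon sl with
       | some ca, some cb => ca == cb
       | _, _ => false) := by
  by_cases s1 : sl = "h"
  · subst s1; decide
  by_cases s2 : sl = "hadamard"
  · subst s2; decide
  by_cases s3 : sl = "cx"
  · subst s3; decide
  by_cases s4 : sl = "cnot"
  · subst s4; decide
  by_cases s5 : sl = "measure"
  · subst s5; decide
  by_cases s6 : sl = "m"
  · subst s6; decide
  by_cases s7 : sl = "x"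
  · subst s7; decide
  by_cases s8 : sl = "pauli_x"
  · subst s8; exact absurd rfl hne
  by_cases s9 : sl = "y"
  · subst s9; decide
  by_cases s10 : sl = "pauli_y"
  · subst s10; decide
  by_cases s11 : sl = "z"
  · subst s11; decide
  by_cases s12 : sl = "pauli_z"
  · subst s12; decide
  by_cases s13 : sl = "barrier"
  · subst s13; decide
  simp [pvAliasLoop, pvAliasesA, pvCanon, PySem.Dict.get?, Ne.symm s1, Ne.symm s2, Ne.symm s3, Ne.symm s4, Ne.symm s5, Ne.symm s6, Ne.symm s7, Ne.symm s8, Ne.symm s9, Ne.symm s10, Ne.symm s11, Ne.symm s12, Ne.symm s13, s1, s2, s3, s4, s5, s6, s7, s8, s9, s10, s11, s12, s13]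

lemma pv_case_9 (sl : String) (hne : "y" ≠ sl) :
    pvAliasLoop "y" sl pvAliasesA =
      (match PySem.Dict.get? pvCanon "y", PySem.Dict.get? pvCanon sl with
       | some ca, some cb => ca == cb
       | _, _ => false) := by
  by_cases s1 : sl = "h"
  · subst s1; decide
  by_cases s2 : sl = "hadamard"
  · subst s2; decide
  by_cases s3 : sl = "cx"
  · subst s3; decide
  by_cases s4 : sl = "cnot"
  · subst s4; decide
  by_cases s5 : sl = "measure"
  · subst s5; decide
  by_cases s6 : sl = "m"
  · subst s6; decide
  by_cases s7 : sl = "x"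
  · subst s7; decide
  by_cases s8 : sl = "pauli_x"
  · subst s8; decide
  by_cases s9 : sl = "y"
  · subst s9; exact absurd rfl hne
  by_cases s10 : sl = "pauli_y"
  · subst s10; decide
  by_cases s11 : sl = "z"
  · subst s11; decide
  by_cases s12 : sl = "pauli_z"
  · subst s12; decide
  by_cases s13 : sl = "barrier"
  · subst s13; decide
  simp [pvAliasLoop, pvAliasesA, pvCanon, PySem.Dict.get?, Ne.symm s1, Ne.symm s2, Ne.symm s3, Ne.symm s4, Ne.symm s5, Ne.symm s6, Ne.symm s7, Ne.symm s8, Ne.symm s9, Ne.symm s10, Ne.symm s11, Ne.symm s12, Ne.symm s13, s1, s2, s3, s4, s5, s6, s7, s8, s9, s10, s11, s12, s13]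

lemma pv_case_10 (sl : String) (hne : "pauli_y" ≠ sl) :
    pvAliasLoop "pauli_y" sl pvAliasesA =
      (match PySem.Dict.get? pvCanon "pauli_y", PySem.Dict.get? pvCanon sl with
       | some ca, some cb => ca == cb
       | _, _ => false) := by
  by_cases s1 : sl = "h"
  · subst s1; decide
  by_cases s2 : sl = "hadamard"
  · subst s2; decide
  by_cases s3 : sl = "cx"
  · subst s3; decide
  by_cases s4 : sl = "cnot"
  · subst s4; decide
  by_cases s5 : sl = "measure"
  · subst s5; decide
  by_cases s6 : sl = "m"
  · subst s6; decide
  by_cases s7 : sl = "x"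
  · subst s7; decide
  by_cases s8 : sl = "pauli_x"
  · subst s8; decide
  by_cases s9 : sl = "y"
  · subst s9; decide
  by_cases s10 : sl = "pauli_y"
  · subst s10; exact absurd rfl hne
  by_cases s11 : sl = "z"
  · subst s11; decide
  by_cases s12 : sl = "pauli_z"
  · subst s12; decide
  by_cases s13 : sl = "barrier"
  · subst s13; decide
  simp [pvAliasLoop, pvAliasesA, pvCanon, PySem.Dict.get?, Ne.symm s1, Ne.symm s2, Ne.symm s3, Ne.symm s4, Ne.symm s5, Ne.symm s6, Ne.symm s7, Ne.symm s8, Ne.symm s9, Ne.symm s10, Ne.symm s11, Ne.symm s12, Ne.symm s13, s1, s2, s3, s4, s5, s6, s7, s8, s9, s10, s11, s12, s13]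

lemma pv_case_11 (sl : String) (hne : "z" ≠ sl) :
    pvAliasLoop "z" sl pvAliasesA =
      (match PySem.Dict.get? pvCanon "z", PySem.Dict.get? pvCanon sl with
       | some ca, some cb => ca == cb
       | _, _ => false) := by
  by_cases s1 : sl = "h"
  · subst s1; decide
  by_cases s2 : sl = "hadamard"
  · subst s2; decide
  by_cases s3 : sl = "cx"
  · subst s3; decide
  by_cases s4 : sl = "cnot"
  · subst s4; decide
  by_cases s5 : sl = "measure"
  · subst s5; decide
  by_cases s6 : sl = "m"
  · subst s6; decide
  by_cases s7 : sl = "x"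
  · subst s7; decide
  by_cases s8 : sl = "pauli_x"
  · subst s8; decide
  by_cases s9 : sl = "y"
  · subst s9; decide
  by_cases s10 : sl = "pauli_y"
  · subst s10; decide
  by_cases s11 : sl = "z"
  · subst s11; exact absurd rfl hne
  by_cases s12 : sl = "pauli_z"
  · subst s12; decide
  by_cases s13 : sl = "barrier"
  · subst s13; decide
  simp [pvAliasLoop, pvAliasesA, pvCanon, PySem.Dict.get?, Ne.symm s1, Ne.symm s2, Ne.symm s3, Ne.symm s4, Ne.symm s5, Ne.symm s6, Ne.symm s7, Ne.symm s8, Ne.symm s9, Ne.symm s10, Ne.symm s11, Ne.symm s12, Ne.symm s13, s1, s2, s3, s4, s5, s6, s7, s8, s9, s10, s11, s12, s13]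

lemma pv_case_12 (sl : String) (hne : "pauli_z" ≠ sl) :
    pvAliasLoop "pauli_z" sl pvAliasesA =
      (match PySem.Dict.get? pvCanon "pauli_z", PySem.Dict.get? pvCanon sl with
       | some ca, some cb => ca == cb
       | _, _ => false) := by
  by_cases s1 : sl = "h"
  · subst s1; decide
  by_cases s2 : sl = "hadamard"
  · subst s2; decide
  by_cases s3 : sl = "cx"
  · subst s3; decide
  by_cases s4 : sl = "cnot"
  · subst s4; decide
  by_cases s5 : sl = "measure"
  · subst s5; decide
  by_cases s6 : sl = "m"
  · subst s6; decide
  by_cases s7 : sl = "x"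
  · subst s7; decide
  by_cases s8 : sl = "pauli_x"
  · subst s8; decide
  by_cases s9 : sl = "y"
  · subst s9; decide
  by_cases s10 : sl = "pauli_y"
  · subst s10; decide
  by_cases s11 : sl = "z"
  · subst s11; decide
  by_cases s12 : sl = "pauli_z"
  · subst s12; exact absurd rfl hne
  by_cases s13 : sl = "barrier"
  · subst s13; decide
  simp [pvAliasLoop, pvAliasesA, pvCanon, PySem.Dict.get?, Ne.symm s1, Ne.symm s2, Ne.symm s3, Ne.symm s4, Ne.symm s5, Ne.symm s6, Ne.symm s7, Ne.symm s8, Ne.symm s9, Ne.symm s10, Ne.symm s11, Ne.symm s12, Ne.symm s13, s1, s2, s3, s4, s5, s6, s7, s8, s9, s10, s11, s12, s13]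

lemma pv_case_13 (sl : String) (hne : "barrier" ≠ sl) :
    pvAliasLoop "barrier" sl pvAliasesA =
      (match PySem.Dict.get? pvCanon "barrier", PySem.Dict.get? pvCanon sl with
       | some ca, some cb => ca == cb
       | _, _ => false) := by
  by_cases s1 : sl = "h"
  · subst s1; decide
  by_cases s2 : sl = "hadamard"
  · subst s2; decide
  by_cases s3 : sl = "cx"
  · subst s3; decide
  by_cases s4 : sl = "cnot"
  · subst s4; decide
  by_cases s5 : sl = "measure"
  · subst s5; decide
  by_cases s6 : sl = "m"
  · subst s6; decide
  by_cases s7 : sl = "x"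
  · subst s7; decide
  by_cases s8 : sl = "pauli_x"
  · subst s8; decide
  by_cases s9 : sl = "y"
  · subst s9; decide
  by_cases s10 : sl = "pauli_y"
  · subst s10; decide
  by_cases s11 : sl = "z"
  · subst s11; decide
  by_cases s12 : sl = "pauli_z"
  · subst s12; decide
  by_cases s13 : sl = "barrier"
  · subst s13; exact absurd rfl hne
  simp [pvAliasLoop, pvAliasesA, pvCanon, PySem.Dict.get?, Ne.symm s1, Ne.symm s2, Ne.symm s3, Ne.symm s4, Ne.symm s5, Ne.symm s6, Ne.symm s7, Ne.symm s8, Ne.symm s9, Ne.symm s10, Ne.symm s11, Ne.symm s12, Ne.symm s13, s1, s2, s3, s4, s5, s6, s7, s8, s9, s10, s11, s12, s13]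

lemma pv_core (cl sl : String) (hne : cl ≠ sl) :
    pvAliasLoop cl sl pvAliasesA =
      (match PySem.Dict.get? pvCanon cl, PySem.Dict.get? pvCanon sl with
       | some ca, some cb => ca == cb
       | _, _ => false) := by
  by_cases c1 : cl = "h"
  · subst c1; exact pv_case_1 sl hne
  by_cases c2 : cl = "hadamard"
  · subst c2; exact pv_case_2 sl hne
  by_cases c3 : cl = "cx"
  · subst c3; exact pv_case_3 sl hne
  by_cases c4 : cl = "cnot"
  · subst c4; exact pv_case_4 sl hne
  by_cases c5 : cl = "measure"
  · subst c5; exact pv_case_5 sl hne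
  by_cases c6 : cl = "m"
  · subst c6; exact pv_case_6 sl hne
  by_cases c7 : cl = "x"
  · subst c7; exact pv_case_7 sl hne
  by_cases c8 : cl = "pauli_x"
  · subst c8; exact pv_case_8 sl hne
  by_cases c9 : cl = "y"
  · subst c9; exact pv_case_9 sl hne
  by_cases c10 : cl = "pauli_y"
  · subst c10; exact pv_case_10 sl hne
  by_cases c11 : cl = "z"
  · subst c11; exact pv_case_11 sl hne
  by_cases c12 : cl = "pauli_z"
  · subst c12; exact pv_case_12 sl hne
  by_cases c13 : cl = "barrier"
  · subst c13; exact pv_case_13 sl hne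
  simp [pvAliasLoop, pvAliasesA, pvCanon, PySem.Dict.get?, Ne.symm c1, Ne.symm c2, Ne.symm c3, Ne.symm c4, Ne.symm c5, Ne.symm c6, Ne.symm c7, Ne.symm c8, Ne.symm c9, Ne.symm c10, Ne.symm c11, Ne.symm c12, Ne.symm c13, c1, c2, c3, c4, c5, c6, c7, c8, c9, c10, c11, c12, c13]

-- ===== VERDICT (by name: the statement is the Claim_ definition above) =====
theorem operations_match_py_spec : Claim_equal_operations_match_py := by
  intro c s _
  unfold Spec_operations_match_py operations_match_py operations_match_py_alt
  simp only []
  split_ifs with h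
  · rfl
  · exact pv_core _ _ (fun e => h (by simp [e]))
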